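-- pv_equiv track=rewrite | github.com/hamdav/kandidatarbete-kod | idea2.py | incRecursive
-- ===== SOURCE A (Python) =====
-- def incRecursive(boxes, n, ls, maxBox):
--     if n == 0:
--         return False
--     elif n in ls:
--         return incRecursive(boxes, n-1, ls, maxBox-1)
--     elif boxes[n] == maxBox:
--         boxes[n] = 0
--         return incRecursive(boxes, n-1, ls, maxBox)
--     else:
--         boxes[n] += 1
--         return True
-- ===== SOURCE B (Python) =====
-- def incRecursive(boxes, n, ls, maxBox):
--     # Pure downward scan: the result is True iff some non-skipped digit k <= n
--     # is below its effective maximum (maxBox minus the number of skipped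
--     # indices above k).  Return value only: unlike A, boxes is NOT mutated.
--     skip = set(ls)
--     dec = 0
--     for k in range(n, 0, -1):
--         if k in skip:
--             dec += 1
--         elif boxes[k] != maxBox - dec:
--             return True
--     return False
-- ===== Notes on version B (the rewrite author's own statement) =====
-- stated objective: simpler
-- what changed: Replaces A's mutating recursion (which zeroes carried digits in place and threads a shrinking maxBox downward) with a pure single for-loop over range(n,0,-1) that keeps a skipped-index counter and answers the existence question 'is some non-skipped digit below its effective maximum'; B does not mutate boxes (equivalence is about the return value only).
-- outside the precondition, e.g. on incRecursive([-1], -1, [4], -2): A returns True, B returns False; on incRecursive([0, 0], 2, [2], 1): A returns False, B returns False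
import Mathlib
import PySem

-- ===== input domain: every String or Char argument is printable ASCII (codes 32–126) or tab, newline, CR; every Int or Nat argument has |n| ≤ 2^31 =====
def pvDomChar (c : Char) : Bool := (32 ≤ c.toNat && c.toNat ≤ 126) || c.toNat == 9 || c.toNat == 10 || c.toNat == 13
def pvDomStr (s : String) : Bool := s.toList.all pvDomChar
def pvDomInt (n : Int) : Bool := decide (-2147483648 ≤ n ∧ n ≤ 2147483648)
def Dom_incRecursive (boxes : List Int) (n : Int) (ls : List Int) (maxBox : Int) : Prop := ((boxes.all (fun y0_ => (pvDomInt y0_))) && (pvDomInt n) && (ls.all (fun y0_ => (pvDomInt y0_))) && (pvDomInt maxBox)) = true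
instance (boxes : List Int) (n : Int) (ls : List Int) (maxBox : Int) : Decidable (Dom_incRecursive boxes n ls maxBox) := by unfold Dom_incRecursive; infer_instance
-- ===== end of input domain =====

-- B computes A's RETURN VALUE by a pure downward scan; A mutates boxes in place (zeroes carried
-- digits) and B does not — the equivalence proved here is about the return value only.

-- ===== PORT A =====
-- literal transliteration of A: recursion on n, threading the mutated boxes and the shrunk
-- maxBox.  The recursion is driven by a fuel counter that only makes it total: whenever the
-- Python recursion terminates it takes at most n + len(boxes) + sum(|x| for x in ls) + 1 calls
-- (for n > 0 it stops at 0 after n steps; for n < 0 it stops as soon as n is below -len(boxes)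
-- and below every element of ls), so the fuel never runs out on those inputs.
def pvIncGo (ls : List Int) : Nat → List Int → Int → Int → Bool
  | 0, _, _, _ => false        -- fuel exhausted: unreachable for the fuel chosen below
  | fuel + 1, boxes, n, maxBox =>
    if n = 0 then false
    else if n ∈ ls then pvIncGo ls fuel boxes (n - 1) (maxBox - 1)
    else
      match PySem.List.pyGet? boxes n with   -- boxes[n]; none = IndexError (outside Pre_)
      | none => false
      | some v =>
        if v = maxBox then pvIncGo ls fuel (boxes.set n.toNat 0) (n - 1) maxBox
        else true

def incRecursive (boxes : List Int) (n : Int) (ls : List Int) (maxBox : Int) : Bool :=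
  pvIncGo ls (n.toNat + boxes.length + (ls.map Int.natAbs).sum + 1) boxes n maxBox

-- ===== PORT B =====
-- the for-loop of Source B: scan ks (= range(n,0,-1)) with the skipped-index counter dec
def pvAltGo (boxes : List Int) (skip : PySem.Set Int) (maxBox : Int) :
    List Int → Int → Bool
  | [], _ => false
  | k :: ks, dec =>
    if k ∈ skip then pvAltGo boxes skip maxBox ks (dec + 1)
    else if PySem.List.pyGet? boxes k ≠ some (maxBox - dec) then true
    else pvAltGo boxes skip maxBox ks dec

def incRecursive_alt (boxes : List Int) (n : Int) (ls : List Int) (maxBox : Int) : Bool :=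
  pvAltGo boxes (PySem.Set.ofList ls) maxBox (PySem.List.pyRange n 0 (-1)) 0

-- ===== PRECONDITION & SPEC =====
-- Pre_ is the natural domain: 0 ≤ n with boxes[n] in range (or n = 0, where nothing is indexed).
-- It also excludes some inputs on which A still returns: n < 0, where A's value comes from
-- Python's accidental negative-index wraparound, and n ≥ len(boxes) with every out-of-range
-- index in ls, where the skip branch happens to dodge the IndexError; on all other excluded
-- inputs A raises IndexError.
def Pre_incRecursive (boxes : List Int) (n : Int) (ls : List Int) (maxBox : Int) : Prop :=
  0 ≤ n ∧ (n < (boxes.length : Int) ∨ n = 0)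
instance (boxes : List Int) (n : Int) (ls : List Int) (maxBox : Int) :
    Decidable (Pre_incRecursive boxes n ls maxBox) := by unfold Pre_incRecursive; infer_instance

def pvWitness_incRecursive : List Int × Int × List Int × Int := ([5, 1, 2], 2, [1], 2)

def Spec_incRecursive (boxes : List Int) (n : Int) (ls : List Int) (maxBox : Int) (out : Bool) : Prop := out = incRecursive_alt boxes n ls maxBox
instance (boxes : List Int) (n : Int) (ls : List Int) (maxBox : Int) (out : Bool) : Decidable (Spec_incRecursive boxes n ls maxBox out) := by unfold Spec_incRecursive; infer_instance

-- ===== CLAIM (what is proved, stated in full; the proofs are below) =====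
def Claim_equal_incRecursive : Prop := ∀ (boxes : List Int) (n : Int) (ls : List Int) (maxBox : Int), Dom_incRecursive boxes n ls maxBox → Pre_incRecursive boxes n ls maxBox → Spec_incRecursive boxes n ls maxBox (incRecursive boxes n ls maxBox)

-- ===== LEMMAS AND PROOFS =====

-- pvAltGo never looks at index i, so zeroing it is invisible when all scanned keys are below i
theorem pvAltGo_set (boxes : List Int) (skip : PySem.Set Int) (M : Int) (i : Nat)
    (ks : List Int) (dec : Int) (hks : ∀ k ∈ ks, 0 < k ∧ k < (i : Int)) :
    pvAltGo (boxes.set i 0) skip M ks dec = pvAltGo boxes skip M ks dec := by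
  induction ks generalizing dec with
  | nil => rfl
  | cons k t ih =>
    have hk := hks k (List.mem_cons_self)
    have hget : PySem.List.pyGet? (boxes.set i 0) k = PySem.List.pyGet? boxes k := by
      rw [PySem.List.pyGet?_of_nonneg _ (by omega : (0:Int) ≤ k),
          PySem.List.pyGet?_of_nonneg _ (by omega : (0:Int) ≤ k)]
      exact List.getElem?_set_ne (by omega)
    simp only [pvAltGo, hget]
    split
    · exact ih (dec + 1) (fun k hk => hks k (List.mem_cons_of_mem _ hk))
    · split
      · rfl
      · exact ih dec (fun k hk => hks k (List.mem_cons_of_mem _ hk))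

theorem pvKey (ls : List Int) (m : Nat) :
    ∀ (fuel : Nat) (boxes : List Int) (maxBox dec : Int), m < fuel →
      ((m : Int) < (boxes.length : Int) ∨ m = 0) →
      pvIncGo ls fuel boxes (m : Int) (maxBox - dec) =
        pvAltGo boxes (PySem.Set.ofList ls) maxBox (PySem.List.pyRange (m : Int) 0 (-1)) dec := by
  induction m with
  | zero =>
    intro fuel boxes maxBox dec hfuel _
    obtain ⟨f, rfl⟩ : ∃ f, fuel = f + 1 := ⟨fuel - 1, by omega⟩
    rw [PySem.List.pyRange_neg_one_eq_nil (by omega)]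
    simp [pvIncGo, pvAltGo]
  | succ m ih =>
    intro fuel boxes maxBox dec hfuel hlen
    obtain ⟨f, rfl⟩ : ∃ f, fuel = f + 1 := ⟨fuel - 1, by omega⟩
    have hsub : ((m + 1 : Nat) : Int) - 1 = (m : Int) := by push_cast; ring
    rw [PySem.List.pyRange_neg_one_cons (by omega), pvIncGo,
        if_neg (show ¬ ((m + 1 : Nat) : Int) = 0 by omega), hsub]
    by_cases hmem : ((m + 1 : Nat) : Int) ∈ ls
    · have hcS : ((m + 1 : Nat) : Int) ∈ PySem.Set.ofList ls :=
        (PySem.Set.mem_ofList _ _).mpr hmem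
      rw [if_pos hmem, show maxBox - dec - 1 = maxBox - (dec + 1) by ring,
          ih f boxes maxBox (dec + 1) (by omega) (by omega)]
      simp only [pvAltGo, if_pos hcS]
    · have hcS : ¬ ((m + 1 : Nat) : Int) ∈ PySem.Set.ofList ls := by
        rw [PySem.Set.mem_ofList]; exact hmem
      rw [if_neg hmem]
      have hin : ((m + 1 : Nat) : Int) < (boxes.length : Int) := by omega
      simp only [pvAltGo, if_neg hcS]
      split
      · -- pyGet? = none: impossible, the index is in range
        rename_i heq
        rw [PySem.List.pyGet?_eq_none_iff] at heq
        exact absurd ⟨by omega, hin⟩ heq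
      · rename_i v heq
        rw [heq]
        by_cases hv : v = maxBox - dec
        · rw [if_pos hv, hv,
              if_neg (show ¬ (some (maxBox - dec) ≠ some (maxBox - dec)) by simp),
              ih f (boxes.set ((m + 1 : Nat) : Int).toNat 0) maxBox dec (by omega)
                (by rw [List.length_set]; omega)]
          refine pvAltGo_set boxes _ maxBox _ _ dec (fun k hk => ?_)
          have hb := (PySem.List.mem_pyRange_neg_one).mp hk
          have ht : (((((m + 1 : Nat) : Int)).toNat : Int)) = ((m + 1 : Nat) : Int) := by omega
          exact ⟨by omega, by omega⟩
        · rw [if_neg hv, if_pos (by simpa using hv)]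

-- ===== VERDICT (by name: the statement is the Claim_ definition above) =====
theorem incRecursive_spec : Claim_equal_incRecursive := by
  intro boxes n ls maxBox _ hpre
  obtain ⟨hn, hlt⟩ := hpre
  unfold Spec_incRecursive incRecursive_alt incRecursive
  have hn' : n = (n.toNat : Int) := by omega
  rw [hn']
  have h := pvKey ls n.toNat (n.toNat + boxes.length + (ls.map Int.natAbs).sum + 1)
      boxes maxBox 0 (by omega) (by omega)
  rw [sub_zero] at h
  rw [hn'] at h ⊢
  exact h
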